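-- pv_equiv track=rewrite | github.com/carlos-gs/MiStuRe | misture_core/MISTURE/utils/utilidades.py | construirsolucion
-- ===== SOURCE A (Python) =====
-- def construirsolucion(pares_ord, sol):
--     if not isinstance(sol, set):
--         raise Exception('sol debe ser un conjunto')
--     while pares_ord:
--         names, med, lev, ccorr = pares_ord.pop(0)
--         sol.add(names)
--         i = 0
--         lg = len(pares_ord)
--         while i < lg:
--             elem = pares_ord[i]
--             if elem[0][0] == names[0] or elem[0][1] == names[1]:
--                 pares_ord.pop(i)
--                 lg -= 1
--             else:
--                 i += 1
--     return sol
-- ===== SOURCE B (Python) =====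
-- def construirsolucion(pares_ord, sol):
--     if not isinstance(sol, set):
--         raise Exception('sol debe ser un conjunto')
--     used_first = set()
--     used_second = set()
--     for names, med, lev, ccorr in pares_ord:
--         if names[0] not in used_first and names[1] not in used_second:
--             used_first.add(names[0])
--             used_second.add(names[1])
--             sol.add(names)
--     pares_ord.clear()
--     return sol
-- ===== Notes on version B (the rewrite author's own statement) =====
-- stated objective: faster
-- what changed: Replaces the nested destructive scan (pop each head, then rescan and pop all conflicting pairs) with a single pass that tracks the already-used first and second components in two hash sets and skips conflicting pairs.
import Mathlib
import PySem

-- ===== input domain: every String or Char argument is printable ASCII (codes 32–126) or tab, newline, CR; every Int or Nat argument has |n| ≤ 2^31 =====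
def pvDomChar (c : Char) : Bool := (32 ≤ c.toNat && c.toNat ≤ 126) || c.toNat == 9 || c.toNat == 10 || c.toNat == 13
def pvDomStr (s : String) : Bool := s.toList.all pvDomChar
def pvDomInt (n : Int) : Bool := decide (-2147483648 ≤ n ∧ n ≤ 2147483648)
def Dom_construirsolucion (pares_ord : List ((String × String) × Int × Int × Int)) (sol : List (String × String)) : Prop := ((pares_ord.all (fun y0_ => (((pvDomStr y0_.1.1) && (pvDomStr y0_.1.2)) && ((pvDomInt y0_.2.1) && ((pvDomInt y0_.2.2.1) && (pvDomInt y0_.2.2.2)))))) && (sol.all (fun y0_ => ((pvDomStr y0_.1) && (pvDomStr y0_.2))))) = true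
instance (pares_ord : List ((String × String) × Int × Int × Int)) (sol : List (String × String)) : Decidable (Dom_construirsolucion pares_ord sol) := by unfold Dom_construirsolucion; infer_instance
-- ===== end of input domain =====

-- B replaces A's destructive quadratic scan (pop head, rescan and pop all conflicting pairs)
-- with one linear pass over pares_ord tracking the used first/second components in two sets (objective: faster).
-- Both programs mutate their arguments (A empties pares_ord, both add to sol); B performs the same
-- mutations, and the equivalence proved here is about the returned set.

-- ===== PORT A =====
-- inner while loop of A: walk the remaining list with an index, popping every
-- element whose first component equals names.1 or second equals names.2
-- (pop-at-i = drop the element, i += 1 = keep it and move on)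
def pvAInner (names : String × String) :
    List ((String × String) × Int × Int × Int) → List ((String × String) × Int × Int × Int)
  | [] => []
  | e :: rest =>
    if e.1.1 = names.1 ∨ e.1.2 = names.2 then pvAInner names rest
    else e :: pvAInner names rest

theorem pvAInner_length_le (names : String × String)
    (l : List ((String × String) × Int × Int × Int)) :
    (pvAInner names l).length ≤ l.length := by
  induction l with
  | nil => simp [pvAInner]
  | cons e rest ih =>
    simp only [pvAInner]
    split <;> simp <;> omega

-- outer while loop of A: pop the head, add its names to sol, run the inner loop
def pvAOuter :
    List ((String × String) × Int × Int × Int) → PySem.Set (String × String) →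
      PySem.Set (String × String)
  | [], sol => sol
  | (names, _med, _lev, _ccorr) :: rest, sol =>
      pvAOuter (pvAInner names rest) (PySem.Set.add sol names)
termination_by l _ => l.length
decreasing_by exact Nat.lt_succ_of_le (pvAInner_length_le _ _)

def construirsolucion (pares_ord : List ((String × String) × Int × Int × Int))
    (sol : List (String × String)) : List (String × String) :=
  pvAOuter pares_ord sol

-- ===== PORT B =====
-- single pass: keep a pair iff neither component was used by an earlier kept pair
def pvBLoop :
    List ((String × String) × Int × Int × Int) → PySem.Set String → PySem.Set String →
      PySem.Set (String × String) → PySem.Set (String × String)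
  | [], _, _, sol => sol
  | (names, _med, _lev, _ccorr) :: rest, usedF, usedS, sol =>
      if !(PySem.Set.contains usedF names.1) && !(PySem.Set.contains usedS names.2) then
        pvBLoop rest (PySem.Set.add usedF names.1) (PySem.Set.add usedS names.2)
          (PySem.Set.add sol names)
      else
        pvBLoop rest usedF usedS sol

def construirsolucion_alt (pares_ord : List ((String × String) × Int × Int × Int))
    (sol : List (String × String)) : List (String × String) :=
  pvBLoop pares_ord PySem.Set.empty PySem.Set.empty sol

-- ===== PRECONDITION & SPEC =====
def Spec_construirsolucion (pares_ord : List ((String × String) × Int × Int × Int)) (sol : List (String × String)) (out : List (String × String)) : Prop := out = construirsolucion_alt pares_ord sol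
instance (pares_ord : List ((String × String) × Int × Int × Int)) (sol : List (String × String)) (out : List (String × String)) : Decidable (Spec_construirsolucion pares_ord sol out) := by unfold Spec_construirsolucion; infer_instance

-- ===== CLAIM (what is proved, stated in full; the proofs are below) =====
def Claim_equal_construirsolucion : Prop := ∀ (pares_ord : List ((String × String) × Int × Int × Int)) (sol : List (String × String)), Dom_construirsolucion pares_ord sol → Spec_construirsolucion pares_ord sol (construirsolucion pares_ord sol)

-- ===== LEMMAS AND PROOFS =====

-- the pairs of l that survive given the already-used first/second components
def pvFilt (usedF usedS : PySem.Set String)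
    (l : List ((String × String) × Int × Int × Int)) :
    List ((String × String) × Int × Int × Int) :=
  l.filter (fun e => !(PySem.Set.contains usedF e.1.1) && !(PySem.Set.contains usedS e.1.2))

theorem pvAInner_eq_filter (names : String × String)
    (l : List ((String × String) × Int × Int × Int)) :
    pvAInner names l =
      l.filter (fun e => !(decide (e.1.1 = names.1)) && !(decide (e.1.2 = names.2))) := by
  induction l with
  | nil => rfl
  | cons e rest ih =>
    simp only [pvAInner, List.filter_cons]
    by_cases h1 : e.1.1 = names.1 <;> by_cases h2 : e.1.2 = names.2 <;>
      simp [h1, h2, ih]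

-- A's inner removal pass, applied to an already-filtered list, just extends the filter
theorem pvAInner_filt (names : String × String) (usedF usedS : PySem.Set String)
    (l : List ((String × String) × Int × Int × Int)) :
    pvAInner names (pvFilt usedF usedS l) =
      pvFilt (PySem.Set.add usedF names.1) (PySem.Set.add usedS names.2) l := by
  rw [pvAInner_eq_filter]
  unfold pvFilt
  rw [List.filter_filter]
  refine List.filter_congr (fun e _ => ?_)
  rw [Bool.eq_iff_iff]
  simp [PySem.Set.contains, PySem.Set.mem_add]
  tauto

theorem pvBLoop_eq_pvAOuter_filt (l : List ((String × String) × Int × Int × Int)) :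
    ∀ (usedF usedS : PySem.Set String) (sol : PySem.Set (String × String)),
      pvBLoop l usedF usedS sol = pvAOuter (pvFilt usedF usedS l) sol := by
  induction l with
  | nil => intro _ _ _; simp [pvBLoop, pvFilt, pvAOuter]
  | cons e rest ih =>
    intro usedF usedS sol
    obtain ⟨names, med, lev, ccorr⟩ := e
    have hBL : pvBLoop ((names, med, lev, ccorr) :: rest) usedF usedS sol =
        if (!PySem.Set.contains usedF names.1 && !PySem.Set.contains usedS names.2) = true
        then pvBLoop rest (PySem.Set.add usedF names.1) (PySem.Set.add usedS names.2)
          (PySem.Set.add sol names)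
        else pvBLoop rest usedF usedS sol := rfl
    have hF : pvFilt usedF usedS ((names, med, lev, ccorr) :: rest) =
        if (!PySem.Set.contains usedF names.1 && !PySem.Set.contains usedS names.2) = true
        then (names, med, lev, ccorr) :: pvFilt usedF usedS rest
        else pvFilt usedF usedS rest := by
      simp only [pvFilt, List.filter_cons]
    rw [hBL, hF]
    cases hc : (!PySem.Set.contains usedF names.1 && !PySem.Set.contains usedS names.2) with
    | false => rw [if_neg (by simp), if_neg (by simp), ih]
    | true =>
      rw [if_pos (by simp), if_pos (by simp),
        ih (PySem.Set.add usedF names.1) (PySem.Set.add usedS names.2) (PySem.Set.add sol names),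
        show pvAOuter ((names, med, lev, ccorr) :: pvFilt usedF usedS rest) sol =
          pvAOuter (pvAInner names (pvFilt usedF usedS rest)) (PySem.Set.add sol names)
          from by simp [pvAOuter],
        pvAInner_filt]

theorem pvFilt_empty (l : List ((String × String) × Int × Int × Int)) :
    pvFilt PySem.Set.empty PySem.Set.empty l = l := by
  simp [pvFilt, PySem.Set.empty, PySem.Set.contains]

-- ===== VERDICT (by name: the statement is the Claim_ definition above) =====
theorem construirsolucion_spec : Claim_equal_construirsolucion := by
  intro pares_ord sol _
  unfold Spec_construirsolucion construirsolucion construirsolucion_alt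
  rw [pvBLoop_eq_pvAOuter_filt, pvFilt_empty]
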